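-- pv_equiv track=rewrite | github.com/981377660LMT/algorithm-study | 11_动态规划/打家劫舍/F - Select Half-打家劫舍一半元素.py | selectHalf
-- ===== SOURCE A (Python) =====
-- from typing import List
--
-- INF = int(1e18)
--
-- def selectHalf(n: int, nums: List[int]) -> int:
--     """恰好选择n//2 (n<=1e5) 个数,使得和最大"""
--     if n <= 1:
--         return 0
--
--     preEvenSum = [0] * (n + 1)  # 每个前缀偶数下标的和
--     for i in range(1, n + 1):
--         preEvenSum[i] = (preEvenSum[i - 1] + nums[i - 1]) if i & 1 else preEvenSum[i - 1]
--
--     dp = [-INF] * n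
--     dp[0] = 0
--     dp[1] = max(nums[0], nums[1])
--     for i in range(2, n):  # 从前i+1个数中选 floor(i+1/2) 个数的最大收益
--         # not jump
--         cand1 = dp[i - 2] + nums[i]
--         # jump
--         if i % 2 == 0:
--             cand2 = dp[i - 1]
--         else:
--             cand2 = preEvenSum[i + 1]
--         dp[i] = max(cand1, cand2)
--
--     return dp[n - 1]
-- ===== SOURCE B (Python) =====
-- from typing import List
--
--
-- def selectHalf(n: int, nums: List[int]) -> int:
--     """恰好选择n//2 (n<=1e5) 个数,使得和最大"""
--     if n <= 1:
--         return 0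
--     k = n // 2
--
--     def step(skip, take):
--         # combine two optional candidates (None = infeasible state)
--         if skip is None:
--             return take
--         if take is None:
--             return skip
--         return max(skip, take)
--
--     # dp rows over "exactly j chosen, no two adjacent": row[j] is the best sum
--     # choosing exactly j non-adjacent elements of the first i, None if infeasible.
--     base = [0] + [None] * k
--     pp = base  # row i-2 (virtual row -1 coincides with row 0)
--     p = base   # row i-1
--     for i in range(1, n + 1):
--         x = nums[i - 1]
--         cur = [0] + [
--             step(p[j], None if pp[j - 1] is None else pp[j - 1] + x)
--             for j in range(1, k + 1)
--         ]
--         pp, p = p, cur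
--     return p[k]
-- ===== Notes on version B (the rewrite author's own statement) =====
-- stated objective: alternative
-- what changed: Replaced A's O(n) prefix-even-sum trick with parity-cased 1D dp by the standard exact-count 2D DP over (first i elements, exactly j chosen, no two adjacent) with None marking infeasible states, rolling two rows.
import Mathlib
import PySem

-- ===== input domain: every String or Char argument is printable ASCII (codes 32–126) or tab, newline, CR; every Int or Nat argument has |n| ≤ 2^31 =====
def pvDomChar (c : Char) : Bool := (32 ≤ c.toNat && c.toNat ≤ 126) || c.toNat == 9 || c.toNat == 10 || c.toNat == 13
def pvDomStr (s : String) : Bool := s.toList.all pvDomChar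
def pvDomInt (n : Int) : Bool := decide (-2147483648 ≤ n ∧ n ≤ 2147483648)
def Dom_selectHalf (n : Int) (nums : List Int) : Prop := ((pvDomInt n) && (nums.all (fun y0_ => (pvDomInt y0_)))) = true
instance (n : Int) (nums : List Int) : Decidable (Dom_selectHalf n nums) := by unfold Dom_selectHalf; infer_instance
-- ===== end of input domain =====

-- B replaces A's prefix-even-sum + parity-cased 1D dp with the standard exact-count
-- 2D DP (exactly j non-adjacent elements of the first i), an alternative of similar size.

-- ===== PORT A =====
def pvINF : Int := 10 ^ 18

-- the preEvenSum loop; Python's `i & 1` equals `i % 2 = 1` for the nonnegative i of range(1, n+1)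
def pvPreStep (nums : List Int) (acc : List Int) (i : Int) : List Int :=
  PySem.List.pySetD acc i
    (if i % 2 = 1 then PySem.List.pyGetD acc (i - 1) 0 + PySem.List.pyGetD nums (i - 1) 0
     else PySem.List.pyGetD acc (i - 1) 0)

-- the dp loop body
def pvDpStep (nums pre : List Int) (acc : List Int) (i : Int) : List Int :=
  let cand1 := PySem.List.pyGetD acc (i - 2) 0 + PySem.List.pyGetD nums i 0
  let cand2 := if i % 2 = 0 then PySem.List.pyGetD acc (i - 1) 0
               else PySem.List.pyGetD pre (i + 1) 0
  PySem.List.pySetD acc i (max cand1 cand2)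

def selectHalf (n : Int) (nums : List Int) : Int :=
  if n ≤ 1 then 0
  else
    let pre := (PySem.List.pyRange 1 (n + 1) 1).foldl (pvPreStep nums)
      (List.replicate (n + 1).toNat 0)
    let dp0 := PySem.List.pySetD (List.replicate n.toNat (-pvINF)) 0 0
    let dp1 := PySem.List.pySetD dp0 1
      (max (PySem.List.pyGetD nums 0 0) (PySem.List.pyGetD nums 1 0))
    let dp := (PySem.List.pyRange 2 n 1).foldl (pvDpStep nums pre) dp1
    PySem.List.pyGetD dp (n - 1) 0

-- ===== PORT B =====
-- `step` of Source B: combine two optional candidates (none = infeasible)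
def pvComb (skip take : Option Int) : Option Int :=
  match skip, take with
  | none, t => t
  | some s, none => some s
  | some s, some t => some (max s t)

-- one iteration of Source B's row loop: state is (pp, p), result (p, cur)
def pvRowStep (nums : List Int) (k : Int) (st : List (Option Int) × List (Option Int))
    (i : Int) : List (Option Int) × List (Option Int) :=
  let pp := st.1
  let p := st.2
  let x := PySem.List.pyGetD nums (i - 1) 0
  let cur := some 0 :: (PySem.List.pyRange 1 (k + 1) 1).map
    (fun j =>
      pvComb (PySem.List.pyGetD p j none)
        (match PySem.List.pyGetD pp (j - 1) none with
         | none => none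
         | some v => some (v + x)))
  (p, cur)

def selectHalf_alt (n : Int) (nums : List Int) : Int :=
  if n ≤ 1 then 0
  else
    let k := PySem.Int.floordiv n 2
    let base : List (Option Int) := some 0 :: List.replicate k.toNat none
    let res := (PySem.List.pyRange 1 (n + 1) 1).foldl (pvRowStep nums k) (base, base)
    ((PySem.List.pyGetD res.2 k none).getD 0 : Int)

-- ===== PRECONDITION & SPEC =====
-- Pre_ excludes exactly the inputs where Python A raises IndexError: 2 ≤ n but nums shorter than n.
def Pre_selectHalf (n : Int) (nums : List Int) : Prop := n ≤ 1 ∨ n ≤ (nums.length : Int)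
instance (n : Int) (nums : List Int) : Decidable (Pre_selectHalf n nums) := by
  unfold Pre_selectHalf; infer_instance

def pvWitness_selectHalf : Int × List Int := (4, [1, 2, 3, 4])

def Spec_selectHalf (n : Int) (nums : List Int) (out : Int) : Prop := out = selectHalf_alt n nums
instance (n : Int) (nums : List Int) (out : Int) : Decidable (Spec_selectHalf n nums out) := by
  unfold Spec_selectHalf; infer_instance

-- ===== CLAIM (what is proved, stated in full; the proofs are below) =====
def Claim_equal_selectHalf : Prop := ∀ (n : Int) (nums : List Int), Dom_selectHalf n nums → Pre_selectHalf n nums → Spec_selectHalf n nums (selectHalf n nums)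

-- ===== LEMMAS AND PROOFS =====

-- functional view of A's preEvenSum array
def preF (nums : List Int) : Nat → Int
  | 0 => 0
  | i + 1 => if (i + 1) % 2 = 1 then preF nums i + nums.getD i 0 else preF nums i

-- functional view of A's dp array
def dpF (nums : List Int) : Nat → Int
  | 0 => 0
  | 1 => max (nums.getD 0 0) (nums.getD 1 0)
  | i + 2 =>
      max (dpF nums i + nums.getD (i + 2) 0)
        (if (i + 2) % 2 = 0 then dpF nums (i + 1) else preF nums (i + 3))

-- functional view of B's rows: rowF i j = entry j of row i-1 (rowF 0 is the virtual row -1)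
def rowF (nums : List Int) : Nat → Nat → Option Int
  | 0, j => if j = 0 then some 0 else none
  | 1, j => if j = 0 then some 0 else none
  | i + 2, j =>
      if j = 0 then some 0
      else
        pvComb (rowF nums (i + 1) j)
          (match rowF nums i (j - 1) with
           | none => none
           | some v => some (v + nums.getD i 0))

theorem rowF_step (nums : List Int) (i j : Nat) (hj : j ≠ 0) :
    rowF nums (i + 2) j =
      pvComb (rowF nums (i + 1) j)
        (match rowF nums i (j - 1) with
         | none => none
         | some v => some (v + nums.getD i 0)) := by
  rw [rowF]
  simp [hj]

theorem rowF_none (nums : List Int) : ∀ i j : Nat, i + 1 ≤ 2 * j → rowF nums i j = none := by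
  intro i
  induction i using Nat.strong_induction_on with
  | _ i ih =>
    intro j hj
    match i with
    | 0 => simp [rowF]; omega
    | 1 => simp [rowF]; omega
    | i + 2 =>
      have hj0 : j ≠ 0 := by omega
      have h1 : rowF nums (i + 1) j = none := ih (i + 1) (by omega) j (by omega)
      have h2 : rowF nums i (j - 1) = none := ih i (by omega) (j - 1) (by omega)
      rw [rowF_step nums i j hj0, h1, h2]
      rfl

theorem rowF_even (nums : List Int) : ∀ t : Nat, 1 ≤ t →
    rowF nums (2 * t) t = some (preF nums (2 * t)) := by
  intro t
  induction t with
  | zero => omega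
  | succ t ih =>
    intro _
    by_cases ht : t = 0
    · subst ht
      simp [rowF, pvComb, preF]
    · have h1 : rowF nums (2 * t + 1) (t + 1) = none := rowF_none nums _ _ (by omega)
      have h2 : rowF nums (2 * t) t = some (preF nums (2 * t)) := ih (by omega)
      have hpre : preF nums (2 * t + 2) = preF nums (2 * t) + nums.getD (2 * t) 0 := by
        have o2 : (2 * t + 1) % 2 = 1 := by omega
        show preF nums ((2 * t + 1) + 1) = _
        rw [preF, if_neg (by omega)]
        show preF nums ((2 * t) + 1) = _
        rw [preF, if_pos o2]
      have e : 2 * (t + 1) = (2 * t) + 2 := by ring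
      rw [e, rowF_step nums (2 * t) (t + 1) (by omega), Nat.add_sub_cancel, h1, h2, hpre]
      rfl

theorem rowF_main (nums : List Int) : ∀ r : Nat, 1 ≤ r →
    rowF nums (r + 1) (r / 2) = some (dpF nums (r - 1)) := by
  intro r
  induction r using Nat.strong_induction_on with
  | _ r ih =>
    intro hr
    match r, hr with
    | 1, _ => simp [rowF, dpF]
    | 2, _ => simp [rowF, pvComb, dpF]
    | (r + 3), _ =>
      -- row index r+4 = (r+2)+2; last element read is nums[r+2]
      have hprev : rowF nums (r + 3) ((r + 2) / 2) = some (dpF nums (r + 1)) :=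
        ih (r + 2) (by omega) (by omega)
      have hprev2 : rowF nums (r + 2) ((r + 1) / 2) = some (dpF nums r) :=
        ih (r + 1) (by omega) (by omega)
      have hstep := rowF_step nums (r + 2) ((r + 3) / 2) (by omega)
      rcases Nat.even_or_odd (r + 3) with he | ho
      · -- r+3 even: the skip candidate is the forced even-prefix row (rowF_even)
        obtain ⟨s, hs⟩ := he
        have hs2 : s ≥ 2 := by omega
        have heven : rowF nums (r + 3) s = some (preF nums (r + 3)) := by
          rw [show r + 3 = 2 * s by omega]
          exact rowF_even nums s (by omega)
        rw [show (r + 1) / 2 = s - 1 by omega] at hprev2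
        have hd : dpF nums (r + 2) =
            max (dpF nums r + nums.getD (r + 2) 0) (preF nums (r + 3)) := by
          rw [dpF, if_neg (by omega)]
        rw [show r + 3 + 1 = (r + 2) + 2 from rfl, show (r + 3) / 2 = s by omega,
          show r + 3 - 1 = r + 2 from rfl]
        rw [show (r + 3) / 2 = s by omega] at hstep
        rw [hstep, heven, hprev2, hd]
        simp [pvComb, max_comm]
      · -- r+3 odd: the skip candidate is the previous main-diagonal entry
        obtain ⟨s, hs⟩ := ho
        have hmain : rowF nums (r + 3) s = some (dpF nums (r + 1)) := by
          rw [show s = (r + 2) / 2 by omega]; exact hprev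
        rw [show (r + 1) / 2 = s - 1 by omega] at hprev2
        have hd : dpF nums (r + 2) =
            max (dpF nums r + nums.getD (r + 2) 0) (dpF nums (r + 1)) := by
          rw [dpF, if_pos (by omega)]
        rw [show r + 3 + 1 = (r + 2) + 2 from rfl, show (r + 3) / 2 = s by omega,
          show r + 3 - 1 = r + 2 from rfl]
        rw [show (r + 3) / 2 = s by omega] at hstep
        rw [hstep, hmain, hprev2, hd]
        simp [pvComb, max_comm]

-- getD after an in-range set, as the dp/preEvenSum updates need
theorem getD_set_int (L : List Int) (i : Nat) (v : Int) (j : Nat) (h : i < L.length) :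
    (L.set i v).getD j 0 = if j = i then v else L.getD j 0 := by
  rcases eq_or_ne j i with rfl | hne
  · simp [List.getD, h]
  · simp [List.getD, List.getElem?_set_ne (by omega : i ≠ j), hne]

-- A's first loop builds exactly the table of preF
theorem preFold (nums : List Int) (N : Nat) :
    ∀ m : Nat, m ≤ N →
      ((PySem.List.pyRange 1 ((m : Int) + 1) 1).foldl (pvPreStep nums)
          (List.replicate (N + 1) 0)).length = N + 1 ∧
      ∀ j : Nat, ((PySem.List.pyRange 1 ((m : Int) + 1) 1).foldl (pvPreStep nums)
          (List.replicate (N + 1) 0)).getD j 0 = if j ≤ m then preF nums j else 0 := by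
  intro m
  induction m with
  | zero =>
    intro _
    rw [PySem.List.pyRange_one_eq_nil (by omega)]
    refine ⟨by simp, ?_⟩
    intro j
    rcases Nat.eq_zero_or_pos j with rfl | hj
    · simp [List.getD, preF]
    · simp [List.getD]
      omega
  | succ m ih =>
    intro hm
    obtain ⟨hl, hg⟩ := ih (by omega)
    rw [show (((m + 1 : Nat) : Int) + 1) = ((m : Int) + 1) + 1 by push_cast; ring,
      PySem.List.pyRange_one_succ_right (by omega), List.foldl_append]
    set L := (PySem.List.pyRange 1 ((m : Int) + 1) 1).foldl (pvPreStep nums)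
      (List.replicate (N + 1) 0) with hL
    have hstep : List.foldl (pvPreStep nums) L [(m : Int) + 1] = pvPreStep nums L ((m : Int) + 1) := rfl
    rw [hstep]
    have hLm : L.getD m 0 = preF nums m := by rw [hg]; simp
    have hv : pvPreStep nums L ((m : Int) + 1) = L.set (m + 1) (preF nums (m + 1)) := by
      rw [pvPreStep, show ((m : Int) + 1 - 1) = ((m : Nat) : Int) by ring]
      rw [PySem.List.pyGetD_natCast, PySem.List.pyGetD_natCast, hLm,
        show ((m : Int) + 1) = (((m + 1 : Nat)) : Int) by push_cast; ring,
        PySem.List.pySetD_natCast]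
      congr 1
      have hpar : (((m + 1 : Nat) : Int) % 2 = 1) ↔ ((m + 1) % 2 = 1) := by omega
      rw [preF]
      by_cases hp : (m + 1) % 2 = 1
      · rw [if_pos (hpar.mpr hp), if_pos hp]
      · rw [if_neg (fun c => hp (hpar.mp c)), if_neg hp]
    rw [hv]
    refine ⟨by simp [hl], ?_⟩
    intro j
    rw [getD_set_int L (m + 1) _ j (by omega)]
    rcases eq_or_ne j (m + 1) with rfl | hne
    · simp
    · rw [if_neg hne, hg]
      by_cases hj : j ≤ m
      · rw [if_pos hj, if_pos (by omega)]
      · rw [if_neg hj, if_neg (by omega)]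

-- A's second loop builds exactly the table of dpF
theorem dpFold (nums pre : List Int) (N : Nat) (hN : 2 ≤ N)
    (hpre : ∀ j : Nat, j ≤ N → pre.getD j 0 = preF nums j) :
    ∀ m : Nat, 2 ≤ m → m ≤ N →
      ((PySem.List.pyRange 2 (m : Int) 1).foldl (pvDpStep nums pre)
          (PySem.List.pySetD (PySem.List.pySetD (List.replicate N (-pvINF)) 0 0) 1
            (max (PySem.List.pyGetD nums 0 0) (PySem.List.pyGetD nums 1 0)))).length = N ∧
      ∀ j : Nat, j < m →
        ((PySem.List.pyRange 2 (m : Int) 1).foldl (pvDpStep nums pre)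
          (PySem.List.pySetD (PySem.List.pySetD (List.replicate N (-pvINF)) 0 0) 1
            (max (PySem.List.pyGetD nums 0 0) (PySem.List.pyGetD nums 1 0)))).getD j 0
          = dpF nums j := by
  have hdp1 : PySem.List.pySetD (PySem.List.pySetD (List.replicate N (-pvINF)) 0 0) 1
      (max (PySem.List.pyGetD nums 0 0) (PySem.List.pyGetD nums 1 0))
      = ((List.replicate N (-pvINF)).set 0 0).set 1
          (max (nums.getD 0 0) (nums.getD 1 0)) := by
    rw [show (0 : Int) = ((0 : Nat) : Int) by norm_num, show (1 : Int) = ((1 : Nat) : Int) by norm_num,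
      PySem.List.pySetD_natCast, PySem.List.pySetD_natCast,
      PySem.List.pyGetD_natCast, PySem.List.pyGetD_natCast]
  intro m hm2
  induction m, hm2 using Nat.le_induction with
  | base =>
    intro _
    rw [show ((2 : Nat) : Int) = 2 by norm_num, PySem.List.pyRange_one_eq_nil (by omega),
      List.foldl_nil, hdp1]
    refine ⟨by simp, ?_⟩
    intro j hj
    interval_cases j
    · rw [getD_set_int _ _ _ _ (by simp; omega), if_neg (by omega),
        getD_set_int _ _ _ _ (by simp; omega), if_pos rfl]
      rfl
    · rw [getD_set_int _ _ _ _ (by simp; omega), if_pos rfl]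
      rfl
  | succ m hm ih =>
    intro hmN
    obtain ⟨hl, hg⟩ := ih (by omega)
    rw [show ((m + 1 : Nat) : Int) = (m : Int) + 1 by push_cast; ring,
      PySem.List.pyRange_one_succ_right (by omega), List.foldl_append]
    set L := (PySem.List.pyRange 2 (m : Int) 1).foldl (pvDpStep nums pre)
      (PySem.List.pySetD (PySem.List.pySetD (List.replicate N (-pvINF)) 0 0) 1
        (max (PySem.List.pyGetD nums 0 0) (PySem.List.pyGetD nums 1 0))) with hLdef
    have hstep : List.foldl (pvDpStep nums pre) L [(m : Int)] = pvDpStep nums pre L (m : Int) := rfl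
    rw [hstep]
    have hv : pvDpStep nums pre L (m : Int) = L.set m (dpF nums m) := by
      rw [pvDpStep]
      rw [show ((m : Int) - 2) = (((m - 2 : Nat)) : Int) by omega,
        show ((m : Int) - 1) = (((m - 1 : Nat)) : Int) by omega,
        show ((m : Int) + 1) = (((m + 1 : Nat)) : Int) by omega]
      rw [PySem.List.pyGetD_natCast, PySem.List.pyGetD_natCast, PySem.List.pyGetD_natCast,
        PySem.List.pyGetD_natCast, PySem.List.pySetD_natCast]
      rw [hg (m - 2) (by omega), hg (m - 1) (by omega), hpre (m + 1) (by omega)]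
      congr 1
      have hd : dpF nums m = max (dpF nums (m - 2) + nums.getD m 0)
          (if m % 2 = 0 then dpF nums (m - 1) else preF nums (m + 1)) := by
        rw [show m = (m - 2) + 2 by omega, dpF]
        rw [show m - 2 + 2 = m by omega, show m - 2 + 1 = m - 1 by omega,
          show m - 2 + 3 = m + 1 by omega]
      rw [hd]
      have hpar : (((m : Nat) : Int) % 2 = 0) ↔ (m % 2 = 0) := by omega
      by_cases hp : m % 2 = 0
      · rw [if_pos (hpar.mpr hp), if_pos hp]
      · rw [if_neg (fun c => hp (hpar.mp c)), if_neg hp]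
    rw [hv]
    refine ⟨by simp [hl], ?_⟩
    intro j hj
    rw [getD_set_int L m _ j (by omega)]
    rcases eq_or_ne j m with rfl | hne
    · simp
    · rw [if_neg hne, hg j (by omega)]

-- B's loop carries exactly the last two rowF rows (entries up to k)
theorem rowFold (nums : List Int) (k : Nat) :
    ∀ m : Nat, ∀ j : Nat, j ≤ k →
      (((PySem.List.pyRange 1 ((m : Int) + 1) 1).foldl (pvRowStep nums (k : Int))
          (some 0 :: List.replicate k none, some 0 :: List.replicate k none)).1.getD j none
        = rowF nums m j) ∧
      (((PySem.List.pyRange 1 ((m : Int) + 1) 1).foldl (pvRowStep nums (k : Int))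
          (some 0 :: List.replicate k none, some 0 :: List.replicate k none)).2.getD j none
        = rowF nums (m + 1) j) := by
  have hbase : ∀ j : Nat, (some 0 :: List.replicate k (none : Option Int)).getD j none
      = if j = 0 then some 0 else none := by
    intro j
    cases j with
    | zero => simp
    | succ j => simp [List.getD]
  intro m
  induction m with
  | zero =>
    intro j hj
    rw [PySem.List.pyRange_one_eq_nil (by omega), List.foldl_nil]
    constructor
    · rw [hbase, rowF]
    · rw [hbase, rowF]
  | succ m ih =>
    intro j hj
    rw [show (((m + 1 : Nat) : Int) + 1) = ((m : Int) + 1) + 1 by push_cast; ring,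
      PySem.List.pyRange_one_succ_right (by omega), List.foldl_append]
    set st := (PySem.List.pyRange 1 ((m : Int) + 1) 1).foldl (pvRowStep nums (k : Int))
      (some 0 :: List.replicate k none, some 0 :: List.replicate k none) with hst
    have hstep : List.foldl (pvRowStep nums (k : Int)) st [(m : Int) + 1]
        = pvRowStep nums (k : Int) st ((m : Int) + 1) := rfl
    rw [hstep, pvRowStep]
    refine ⟨(ih j hj).2, ?_⟩
    cases j with
    | zero =>
      rw [List.getD_cons_zero, rowF]
      simp
    | succ j' =>
      rw [List.getD_cons_succ]
      rw [PySem.List.pyRange_one, show ((k : Int) + 1 - 1) = ((k : Nat) : Int) by ring,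
        Int.toNat_natCast, List.map_map, PySem.List.getD_map_range _ _ _ _ (by omega)]
      show pvComb (PySem.List.pyGetD st.2 (1 + (j' : Int)) none)
          (match PySem.List.pyGetD st.1 (1 + (j' : Int) - 1) none with
           | none => none
           | some v => some (v + PySem.List.pyGetD nums ((m : Int) + 1 - 1) 0))
        = rowF nums (m + 1 + 1) (j' + 1)
      rw [show (1 + (j' : Int)) = (((j' + 1 : Nat)) : Int) by push_cast; ring,
        show (((j' + 1 : Nat) : Int) - 1) = ((j' : Nat) : Int) by push_cast; ring,
        show ((m : Int) + 1 - 1) = ((m : Nat) : Int) by ring]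
      rw [PySem.List.pyGetD_natCast, PySem.List.pyGetD_natCast, PySem.List.pyGetD_natCast]
      rw [(ih (j' + 1) hj).2, (ih j' (by omega)).1]
      rw [rowF_step nums m (j' + 1) (by omega), Nat.add_sub_cancel]

-- A computes dpF (n-1)
theorem selectHalf_eq_dpF (n : Int) (nums : List Int) (h : ¬ n ≤ 1) :
    selectHalf n nums = dpF nums (n.toNat - 1) := by
  set N := n.toNat with hNdef
  have h2 : 2 ≤ N := by omega
  have hn : (N : Int) = n := by omega
  rw [selectHalf, if_neg h, ← hn]
  rw [show (((N : Int)) + 1).toNat = N + 1 by omega, show ((N : Int)).toNat = N by omega]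
  obtain ⟨hl, hg⟩ := preFold nums N N le_rfl
  set pre := (PySem.List.pyRange 1 ((N : Int) + 1) 1).foldl (pvPreStep nums)
    (List.replicate (N + 1) 0) with hpredef
  have hpreN : ∀ j : Nat, j ≤ N → pre.getD j 0 = preF nums j := by
    intro j hj
    rw [hg j, if_pos hj]
  obtain ⟨hl2, hg2⟩ := dpFold nums pre N h2 hpreN N h2 le_rfl
  rw [show ((N : Int) - 1) = (((N - 1 : Nat)) : Int) by omega, PySem.List.pyGetD_natCast]
  exact hg2 (N - 1) (by omega)

-- B computes dpF (n-1) as well, via the main-diagonal lemma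
theorem alt_eq_dpF (n : Int) (nums : List Int) (h : ¬ n ≤ 1) :
    selectHalf_alt n nums = dpF nums (n.toNat - 1) := by
  set N := n.toNat with hNdef
  have h2 : 2 ≤ N := by omega
  have hn : (N : Int) = n := by omega
  have hk : PySem.Int.floordiv n 2 = ((N / 2 : Nat) : Int) := by
    unfold PySem.Int.floordiv
    rw [Int.fdiv_eq_ediv]
    omega
  rw [selectHalf_alt, if_neg h, hk, ← hn]
  simp only [Int.toNat_natCast]
  have hrow := (rowFold nums (N / 2) N (N / 2) le_rfl).2
  rw [PySem.List.pyGetD_natCast, hrow, rowF_main nums N (by omega)]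
  rfl

-- ===== VERDICT (by name: the statement is the Claim_ definition above) =====
theorem selectHalf_spec : Claim_equal_selectHalf := by
  intro n nums _ _
  unfold Spec_selectHalf
  by_cases h : n ≤ 1
  · rw [selectHalf, selectHalf_alt, if_pos h, if_pos h]
  · rw [selectHalf_eq_dpF n nums h, alt_eq_dpF n nums h]
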